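-- pv_equiv track=rewrite | github.com/posl/comment_recommendation | script/mod_gen/4_time/zh/147_C/3.py | f
-- ===== SOURCE A (Python) =====
-- def f(n, a, x, y):
--     ans = 0
--     for i in range(2**n):
--         honest = [0] * n
--         for j in range(n):
--             if (i >> j) & 1:
--                 honest[j] = 1
--         ok = True
--         for j in range(n):
--             if honest[j] == 0:
--                 continue
--             for k in range(a[j]):
--                 if honest[x[j][k] - 1] != y[j][k]:
--                     ok = False
--         if ok:
--             ans = max(ans, sum(honest))
--     return ans
-- ===== SOURCE B (Python) =====
-- def f(n, a, x, y):
--     def consistent(honest):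
--         for j in range(n):
--             if honest[j] == 0:
--                 continue
--             for k in range(a[j]):
--                 if honest[x[j][k] - 1] != y[j][k]:
--                     return False
--         return True
--
--     def go(honest):
--         if len(honest) == n:
--             return sum(honest) if consistent(honest) else 0
--         return max(go(honest + [1]), go(honest + [0]))
--
--     return go([])
-- ===== Notes on version B (the rewrite author's own statement) =====
-- stated objective: alternative
-- what changed: Replaces the integer-bitmask enumeration (decoding each i in range(2**n) into an honest[] list via bit shifts) with recursive backtracking that assigns each person honest/unkind in turn and returns the best consistent leaf; the consistency rule is the same but exits at the first contradiction instead of scanning all testimonies with a flag.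
import Mathlib
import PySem

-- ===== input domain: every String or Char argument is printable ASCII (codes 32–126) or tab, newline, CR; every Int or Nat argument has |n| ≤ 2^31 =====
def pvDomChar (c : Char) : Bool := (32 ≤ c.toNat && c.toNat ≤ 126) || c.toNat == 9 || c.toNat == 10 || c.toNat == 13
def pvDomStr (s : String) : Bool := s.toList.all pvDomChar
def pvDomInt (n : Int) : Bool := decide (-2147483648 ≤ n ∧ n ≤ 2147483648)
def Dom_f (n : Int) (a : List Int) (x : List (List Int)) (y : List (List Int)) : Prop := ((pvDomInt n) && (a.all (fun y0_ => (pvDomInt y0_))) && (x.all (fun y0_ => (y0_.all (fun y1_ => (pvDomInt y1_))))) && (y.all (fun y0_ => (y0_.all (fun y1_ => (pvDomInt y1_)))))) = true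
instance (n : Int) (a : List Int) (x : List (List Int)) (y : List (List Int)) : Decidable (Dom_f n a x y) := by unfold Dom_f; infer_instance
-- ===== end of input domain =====

-- B replaces A's integer-bitmask enumeration of assignments with recursive backtracking over
-- persons (same consistency rule, early exit at the first contradiction); same return value,
-- stated as an 'alternative' decomposition, not a speed claim.

-- ===== PORT A =====
-- one testimony check, the comparison both Pythons write as honest[x[j][k]-1] != y[j][k]
-- (pyGet? = none is Python's IndexError, excluded by Pre_; the port yields a failed check there)
def testimonyBad (x y : List (List Int)) (honest : List Int) (j k : Nat) : Bool :=
  match PySem.List.pyGet? honest ((PySem.List.pyGetD (PySem.List.pyGetD x (j : Int) []) (k : Int) 0) - 1) with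
  | some v => v ≠ PySem.List.pyGetD (PySem.List.pyGetD y (j : Int) []) (k : Int) 0
  | none => true

-- honest = [0]*n with bit j of i written into slot j: slot j holds (i >> j) & 1
def bitsA (N i : Nat) : List Int :=
  (List.range N).map (fun j => if (i >>> j) &&& 1 == 1 then (1 : Int) else 0)

-- A's consistency scan: a Boolean flag 'ok' set to False on any mismatch, no early exit
def okA (N : Nat) (a : List Int) (x y : List (List Int)) (honest : List Int) : Bool :=
  (List.range N).foldl (fun (ok : Bool) (j : Nat) =>
    if PySem.List.pyGetD honest (j : Int) 0 == 0 then ok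
    else (List.range (PySem.List.pyGetD a (j : Int) 0).toNat).foldl
      (fun (ok : Bool) (k : Nat) => if testimonyBad x y honest j k then false else ok) ok) true

def f (n : Int) (a : List Int) (x : List (List Int)) (y : List (List Int)) : Int :=
  let N := n.toNat
  (List.range (2 ^ N)).foldl (fun ans i =>
    let honest := bitsA N i
    if okA N a x y honest then max ans honest.sum else ans) 0

-- ===== PORT B =====
-- B's inner testimony loop: returns False at the first contradiction (early return)
def okInnerB (x y : List (List Int)) (honest : List Int) (j : Nat) : List Nat → Bool
  | [] => true
  | k :: ks => if testimonyBad x y honest j k then false else okInnerB x y honest j ks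

-- B's 'consistent': walk the persons, early-return False on a contradicted testimony
def okB (a : List Int) (x y : List (List Int)) (honest : List Int) : List Nat → Bool
  | [] => true
  | j :: js =>
    if PySem.List.pyGetD honest (j : Int) 0 == 0 then okB a x y honest js
    else okInnerB x y honest j (List.range (PySem.List.pyGetD a (j : Int) 0).toNat) && okB a x y honest js

-- B's backtracking: assign the next person honest (1) or unkind (0); at full depth score the leaf
def goB (N : Nat) (a : List Int) (x y : List (List Int)) (honest : List Int) : Nat → Int
  | 0 => if okB a x y honest (List.range N) then honest.sum else 0
  | m + 1 => max (goB N a x y (honest ++ [1]) m) (goB N a x y (honest ++ [0]) m)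

def f_alt (n : Int) (a : List Int) (x : List (List Int)) (y : List (List Int)) : Int :=
  goB n.toNat a x y [] n.toNat

-- ===== PRECONDITION & SPEC =====
-- Pre_f excludes exactly the inputs where the Python A raises: negative n (range(2**n) is a
-- TypeError), a shorter than n (IndexError on a[j]), and any testimony (j,k) actually scanned
-- whose x[j]/y[j]/x[j][k]/y[j][k] access or honest[x[j][k]-1] index is out of range (IndexError).
def Pre_f (n : Int) (a : List Int) (x : List (List Int)) (y : List (List Int)) : Prop :=
  0 ≤ n ∧ n ≤ (a.length : Int) ∧
  ∀ j ∈ List.range n.toNat,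
    0 < PySem.List.pyGetD a (j : Int) 0 →
      (j : Int) < (x.length : Int) ∧ (j : Int) < (y.length : Int) ∧
      (PySem.List.pyGetD a (j : Int) 0).toNat ≤ (PySem.List.pyGetD x (j : Int) []).length ∧
      (PySem.List.pyGetD a (j : Int) 0).toNat ≤ (PySem.List.pyGetD y (j : Int) []).length ∧
      ∀ v ∈ (PySem.List.pyGetD x (j : Int) []).take (PySem.List.pyGetD a (j : Int) 0).toNat,
        -n ≤ v - 1 ∧ v - 1 < n
instance (n : Int) (a : List Int) (x : List (List Int)) (y : List (List Int)) : Decidable (Pre_f n a x y) := by unfold Pre_f; infer_instance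

def pvWitness_f : Int × List Int × List (List Int) × List (List Int) :=
  (2, [1, 0], [[2], []], [[1], []])

def Spec_f (n : Int) (a : List Int) (x : List (List Int)) (y : List (List Int)) (out : Int) : Prop := out = f_alt n a x y
instance (n : Int) (a : List Int) (x : List (List Int)) (y : List (List Int)) (out : Int) : Decidable (Spec_f n a x y out) := by unfold Spec_f; infer_instance

-- ===== CLAIM (what is proved, stated in full; the proofs are below) =====
def Claim_equal_f : Prop := ∀ (n : Int) (a : List Int) (x : List (List Int)) (y : List (List Int)), Dom_f n a x y → Pre_f n a x y → Spec_f n a x y (f n a x y)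

-- ===== LEMMAS AND PROOFS =====

-- ---- the two consistency checks agree ----
theorem foldl_flag_inner (bad : Nat → Bool) (ks : List Nat) :
    ∀ b : Bool, ks.foldl (fun ok k => if bad k then false else ok) b
      = (b && ks.all (fun k => !bad k)) := by
  induction ks with
  | nil => simp
  | cons k t ih =>
    intro b
    simp only [List.foldl_cons, List.all_cons]
    rw [ih]
    cases h : bad k <;> simp

theorem okInnerB_all (x y : List (List Int)) (honest : List Int) (j : Nat) (ks : List Nat) :
    okInnerB x y honest j ks = ks.all (fun k => !testimonyBad x y honest j k) := by
  induction ks with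
  | nil => rfl
  | cons k t ih =>
    cases h : testimonyBad x y honest j k <;> simp [okInnerB, h, ih]

theorem foldl_flag_outer (skip inner : Nat → Bool) (js : List Nat) :
    ∀ b : Bool, js.foldl (fun ok j => if skip j then ok else (ok && inner j)) b
      = (b && js.all (fun j => skip j || inner j)) := by
  induction js with
  | nil => simp
  | cons j t ih =>
    intro b
    simp only [List.foldl_cons, List.all_cons]
    rw [ih]
    cases h : skip j <;> simp [Bool.and_assoc]

theorem okA_eq_okB (N : Nat) (a : List Int) (x y : List (List Int)) (honest : List Int) :
    okA N a x y honest = okB a x y honest (List.range N) := by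
  have hA : okA N a x y honest
      = (List.range N).all (fun j => (PySem.List.pyGetD honest (j : Int) 0 == 0)
          || (List.range (PySem.List.pyGetD a (j : Int) 0).toNat).all
              (fun k => !testimonyBad x y honest j k)) := by
    unfold okA
    have hfun : (fun (ok : Bool) (j : Nat) =>
        if PySem.List.pyGetD honest (j : Int) 0 == 0 then ok
        else (List.range (PySem.List.pyGetD a (j : Int) 0).toNat).foldl
          (fun (ok : Bool) (k : Nat) => if testimonyBad x y honest j k then false else ok) ok)
      = (fun (ok : Bool) (j : Nat) =>
        if (fun j : Nat => PySem.List.pyGetD honest (j : Int) 0 == 0) j then ok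
        else (ok && (fun j : Nat => (List.range (PySem.List.pyGetD a (j : Int) 0).toNat).all
          (fun k => !testimonyBad x y honest j k)) j)) := by
      funext ok j
      rw [foldl_flag_inner]
    rw [hfun, foldl_flag_outer]
    simp
  have hB : ∀ js : List Nat, okB a x y honest js
      = js.all (fun j => (PySem.List.pyGetD honest (j : Int) 0 == 0)
          || (List.range (PySem.List.pyGetD a (j : Int) 0).toNat).all
              (fun k => !testimonyBad x y honest j k)) := by
    intro js
    induction js with
    | nil => rfl
    | cons j t ih =>
      simp only [okB, okInnerB_all, ih, List.all_cons]
      cases h : (PySem.List.pyGetD honest (j : Int) 0 == 0) <;> simp [h]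
  rw [hA, hB]

-- ---- leaf value and max-fold machinery ----
def leafV (N : Nat) (a : List Int) (x y : List (List Int)) (s : List Int) : Int :=
  if okA N a x y s then s.sum else 0

def maxFold (N : Nat) (a : List Int) (x y : List (List Int)) (l : List (List Int)) : Int :=
  l.foldl (fun acc s => max acc (leafV N a x y s)) 0

theorem leafV_nonneg (N : Nat) (a : List Int) (x y : List (List Int)) (s : List Int)
    (hs : ∀ v ∈ s, v = 0 ∨ v = 1) : 0 ≤ leafV N a x y s := by
  unfold leafV
  split
  · exact List.sum_nonneg (fun v hv => by rcases hs v hv with h | h <;> simp [h])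
  · exact le_refl 0

theorem le_maxfoldl (N : Nat) (a : List Int) (x y : List (List Int)) (l : List (List Int)) :
    ∀ b : Int, b ≤ l.foldl (fun acc s => max acc (leafV N a x y s)) b := by
  induction l with
  | nil => intro b; simp
  | cons s t ih => intro b; exact le_trans (le_max_left _ _) (ih _)

theorem foldl_max_shift (N : Nat) (a : List Int) (x y : List (List Int)) :
    ∀ (l : List (List Int)) (b : Int), 0 ≤ b → (∀ s ∈ l, ∀ v ∈ s, v = 0 ∨ v = 1) →
      l.foldl (fun acc s => max acc (leafV N a x y s)) b = max b (maxFold N a x y l) := by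
  intro l
  induction l with
  | nil => intro b hb _; simp [maxFold]; omega
  | cons s t ih =>
    intro b hb hbin
    have hs : 0 ≤ leafV N a x y s := leafV_nonneg N a x y s (hbin s (by simp))
    have htail : ∀ s' ∈ t, ∀ v ∈ s', v = 0 ∨ v = 1 := fun s' h => hbin s' (by simp [h])
    simp only [List.foldl_cons, maxFold]
    rw [ih (max b (leafV N a x y s)) (le_trans hb (le_max_left _ _)) htail,
        ih (max 0 (leafV N a x y s)) (le_max_left _ _) htail]
    unfold maxFold
    omega

theorem maxFold_append (N : Nat) (a : List Int) (x y : List (List Int))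
    (l1 l2 : List (List Int))
    (h2 : ∀ s ∈ l2, ∀ v ∈ s, v = 0 ∨ v = 1) :
    maxFold N a x y (l1 ++ l2) = max (maxFold N a x y l1) (maxFold N a x y l2) := by
  unfold maxFold
  rw [List.foldl_append]
  exact foldl_max_shift N a x y l2 _ (le_maxfoldl N a x y l1 0) h2



-- ---- the two enumerations of assignments ----
def enumB : Nat → List (List Int)
  | 0 => [[]]
  | m + 1 => (enumB m).map (1 :: ·) ++ (enumB m).map (0 :: ·)

def enumA (N : Nat) : List (List Int) := (List.range (2 ^ N)).map (bitsA N)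

theorem bit_expr_testBit (i j : Nat) : ((i >>> j) &&& 1 == 1) = i.testBit j := by
  simp [Nat.testBit, Nat.and_one_is_mod, Nat.one_and_eq_mod_two]

theorem bitsA_testBit (N i : Nat) :
    bitsA N i = (List.range N).map (fun j => if i.testBit j then (1 : Int) else 0) := by
  unfold bitsA
  exact List.map_congr_left fun j _ => by rw [bit_expr_testBit]

theorem enumA_succ (N : Nat) :
    enumA (N + 1) = (enumA N).map (· ++ [0]) ++ (enumA N).map (· ++ [1]) := by
  unfold enumA
  have h2 : 2 ^ (N + 1) = 2 ^ N + 2 ^ N := by rw [pow_succ]; omega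
  rw [h2, List.range_add, List.map_append, List.map_map, List.map_map, List.map_map]
  congr 1
  · refine List.map_congr_left fun i hi => ?_
    have hlt : i < 2 ^ N := List.mem_range.mp hi
    show bitsA (N + 1) i = bitsA N i ++ [0]
    rw [bitsA_testBit, bitsA_testBit, List.range_succ, List.map_append]
    simp [Nat.testBit_lt_two_pow hlt]
  · refine List.map_congr_left fun i hi => ?_
    have hlt : i < 2 ^ N := List.mem_range.mp hi
    show bitsA (N + 1) (2 ^ N + i) = bitsA N i ++ [1]
    rw [bitsA_testBit, bitsA_testBit, List.range_succ, List.map_append]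
    congr 1
    · exact List.map_congr_left fun j hj => by
        rw [Nat.testBit_two_pow_add_gt (List.mem_range.mp hj)]
    · simp [Nat.testBit_two_pow_add_eq, Nat.testBit_lt_two_pow hlt]

def IsBin (N : Nat) (s : List Int) : Prop := s.length = N ∧ ∀ v ∈ s, v = 0 ∨ v = 1

theorem mem_enumB (N : Nat) (s : List Int) : s ∈ enumB N ↔ IsBin N s := by
  induction N generalizing s with
  | zero =>
    simp only [enumB, List.mem_singleton, IsBin]
    constructor
    · rintro rfl; simp
    · rintro ⟨h, -⟩; exact List.eq_nil_of_length_eq_zero h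
  | succ m ih =>
    simp only [enumB, List.mem_append, List.mem_map]
    constructor
    · rintro (⟨t, ht, rfl⟩ | ⟨t, ht, rfl⟩) <;>
        obtain ⟨hl, hb⟩ := (ih t).mp ht <;>
        refine ⟨by simp [hl], ?_⟩ <;>
        · intro v hv
          rcases List.mem_cons.mp hv with rfl | hv
          · simp
          · exact hb v hv
    · rintro ⟨hl, hb⟩
      match s with
      | [] => simp at hl
      | v :: t =>
        have htb : t ∈ enumB m := (ih t).mpr ⟨by simpa using hl, fun w hw => hb w (by simp [hw])⟩
        rcases hb v (by simp) with rfl | rfl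
        · exact Or.inr ⟨t, htb, rfl⟩
        · exact Or.inl ⟨t, htb, rfl⟩

theorem mem_enumA (N : Nat) (s : List Int) : s ∈ enumA N ↔ IsBin N s := by
  induction N generalizing s with
  | zero =>
    simp only [enumA, pow_zero, List.range_one, List.map_cons, List.map_nil,
      List.mem_singleton, IsBin]
    constructor
    · rintro rfl; simp [bitsA]
    · rintro ⟨h, -⟩
      rw [List.eq_nil_of_length_eq_zero h]; simp [bitsA]
  | succ m ih =>
    rw [enumA_succ]
    simp only [List.mem_append, List.mem_map]
    constructor
    · rintro (⟨t, ht, rfl⟩ | ⟨t, ht, rfl⟩) <;>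
        obtain ⟨hl, hb⟩ := (ih t).mp ht <;>
        refine ⟨by simp [hl], ?_⟩ <;>
        · intro v hv
          rcases List.mem_append.mp hv with hv | hv
          · exact hb v hv
          · rcases List.mem_singleton.mp hv with rfl
            simp
    · rintro ⟨hl, hb⟩
      have hne : s ≠ [] := by rintro rfl; simp at hl
      obtain ⟨t, b, rfl⟩ : ∃ t b, s = t ++ [b] := ⟨s.dropLast, s.getLast hne, by
        rw [List.dropLast_append_getLast hne]⟩
      have htb : t ∈ enumA m := (ih t).mpr ⟨by simpa using hl, fun w hw => hb w (by simp [hw])⟩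
      rcases hb b (by simp) with rfl | rfl
      · exact Or.inl ⟨t, htb, rfl⟩
      · exact Or.inr ⟨t, htb, rfl⟩

theorem nodup_enumB (N : Nat) : (enumB N).Nodup := by
  induction N with
  | zero => simp [enumB]
  | succ m ih =>
    refine List.Nodup.append (ih.map (List.cons_injective)) (ih.map (List.cons_injective)) ?_
    intro s h1 h2
    obtain ⟨t, -, rfl⟩ := List.mem_map.mp h1
    obtain ⟨u, -, he⟩ := List.mem_map.mp h2
    simp at he

theorem nodup_enumA (N : Nat) : (enumA N).Nodup := by
  induction N with
  | zero => simp [enumA]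
  | succ m ih =>
    rw [enumA_succ]
    have hinj : ∀ b : Int, Function.Injective (fun t : List Int => t ++ [b]) := by
      intro b t u h
      simpa using List.append_inj_left' h (by simp)
    refine List.Nodup.append (ih.map (hinj 0)) (ih.map (hinj 1)) ?_
    intro s h1 h2
    obtain ⟨t, -, rfl⟩ := List.mem_map.mp h1
    obtain ⟨u, -, he⟩ := List.mem_map.mp h2
    have := congrArg List.getLast? he
    simp at this

theorem perm_enum (N : Nat) : (enumA N).Perm (enumB N) :=
  (List.perm_ext_iff_of_nodup (nodup_enumA N) (nodup_enumB N)).mpr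
    (fun s => (mem_enumA N s).trans (mem_enumB N s).symm)

-- ---- B's recursion computes the max-fold over enumB ----
theorem goB_eq (N : Nat) (a : List Int) (x y : List (List Int)) :
    ∀ (m : Nat) (h : List Int), (∀ v ∈ h, v = 0 ∨ v = 1) →
      goB N a x y h m = maxFold N a x y ((enumB m).map (h ++ ·)) := by
  intro m
  induction m with
  | zero =>
    intro h hb
    have h0 : 0 ≤ leafV N a x y h := leafV_nonneg N a x y h hb
    simp only [goB, enumB, List.map_cons, List.map_nil, List.append_nil, maxFold,
      List.foldl_cons, List.foldl_nil, ← okA_eq_okB]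
    unfold leafV at h0 ⊢
    omega
  | succ m ih =>
    intro h hb
    have hbin1 : ∀ v ∈ h ++ [(1 : Int)], v = 0 ∨ v = 1 := by
      intro v hv; rcases List.mem_append.mp hv with hv | hv
      · exact hb v hv
      · simp at hv; simp [hv]
    have hbin0 : ∀ v ∈ h ++ [(0 : Int)], v = 0 ∨ v = 1 := by
      intro v hv; rcases List.mem_append.mp hv with hv | hv
      · exact hb v hv
      · simp at hv; simp [hv]
    have hmapbin : ∀ (c : Int), (c = 0 ∨ c = 1) →
        ∀ s ∈ (enumB m).map (fun t => h ++ (c :: t)), ∀ v ∈ s, v = 0 ∨ v = 1 := by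
      intro c hc s hs v hv
      obtain ⟨t, htm, rfl⟩ := List.mem_map.mp hs
      rcases List.mem_append.mp hv with hv | hv
      · exact hb v hv
      · rcases List.mem_cons.mp hv with rfl | hv
        · exact hc
        · exact ((mem_enumB m t).mp htm).2 v hv
    simp only [goB, enumB, List.map_append, List.map_map]
    rw [ih (h ++ [1]) hbin1, ih (h ++ [0]) hbin0,
      maxFold_append N a x y _ _
        (by simpa [Function.comp] using hmapbin 0 (Or.inl rfl))]
    congr 1 <;>
      · unfold maxFold
        congr 1
        exact List.map_congr_left fun t _ => by simp

-- ---- A's fold computes the max-fold over enumA ----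
theorem f_eq_maxFold (n : Int) (a : List Int) (x y : List (List Int)) :
    f n a x y = maxFold n.toNat a x y (enumA n.toNat) := by
  unfold f enumA maxFold
  rw [List.foldl_map]
  have key : ∀ (l : List Nat) (b : Int), 0 ≤ b →
      l.foldl (fun ans i => if okA n.toNat a x y (bitsA n.toNat i)
          then max ans (bitsA n.toNat i).sum else ans) b
        = l.foldl (fun acc i => max acc (leafV n.toNat a x y (bitsA n.toNat i))) b := by
    intro l
    induction l with
    | nil => intro b _; rfl
    | cons i t ih =>
      intro b hb
      simp only [List.foldl_cons]
      unfold leafV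
      by_cases h : okA n.toNat a x y (bitsA n.toNat i) = true
      · simp only [h, if_true]
        exact ih _ (le_trans hb (le_max_left _ _))
      · simp only [h, if_false, Bool.false_eq_true]
        rw [show max b 0 = b by omega]
        exact ih b hb
  exact key _ 0 le_rfl

-- ---- assemble ----
theorem f_eq_f_alt (n : Int) (a : List Int) (x : List (List Int)) (y : List (List Int)) :
    f n a x y = f_alt n a x y := by
  rw [f_eq_maxFold]
  unfold f_alt
  rw [goB_eq n.toNat a x y n.toNat [] (by simp)]
  have hmap : (enumB n.toNat).map (([] : List Int) ++ ·) = enumB n.toNat := by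
    simp
  rw [hmap]
  unfold maxFold
  exact (perm_enum n.toNat).foldl_eq (rcomm := ⟨fun acc s t => by omega⟩) 0

-- ===== VERDICT (by name: the statement is the Claim_ definition above) =====
theorem f_spec : Claim_equal_f := by
  intro n a x y _ _
  unfold Spec_f
  exact f_eq_f_alt n a x y
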